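-- pv_equiv track=rewrite | github.com/JRA2002/python_problems | LEETCODE/easy/rank_transform.py | array_transform
-- ===== SOURCE A (Python) =====
-- def array_transform(arr: list):
--     hash_index = {}
--     n = len(arr)
--     for i in range(n):
--         if i not in hash_index:
--             hash_index[i] = arr[i]
--
--     arr.sort()
--     hash_table = {}
--     j = 1
--
--     for i in range(n):
--         if arr[i] not in hash_table:
--             hash_table[arr[i]] = j
--             j += 1
--
--     for k,v in hash_index.items():
--         arr[k] = hash_table[v]
--
--     return arr
-- ===== SOURCE B (Python) =====
-- def array_transform(arr: list):
--     # counting approach: rank of v = 1 + number of distinct values smaller than v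
--     distinct = set(arr)
--     arr[:] = [1 + sum(1 for u in distinct if u < v) for v in arr]
--     return arr
-- ===== Notes on version B (the rewrite author's own statement) =====
-- stated objective: alternative
-- what changed: B drops A's sort and both dictionaries entirely: it computes each element's rank directly as 1 + the number of distinct values strictly smaller than it, by counting over set(arr).
import Mathlib
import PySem

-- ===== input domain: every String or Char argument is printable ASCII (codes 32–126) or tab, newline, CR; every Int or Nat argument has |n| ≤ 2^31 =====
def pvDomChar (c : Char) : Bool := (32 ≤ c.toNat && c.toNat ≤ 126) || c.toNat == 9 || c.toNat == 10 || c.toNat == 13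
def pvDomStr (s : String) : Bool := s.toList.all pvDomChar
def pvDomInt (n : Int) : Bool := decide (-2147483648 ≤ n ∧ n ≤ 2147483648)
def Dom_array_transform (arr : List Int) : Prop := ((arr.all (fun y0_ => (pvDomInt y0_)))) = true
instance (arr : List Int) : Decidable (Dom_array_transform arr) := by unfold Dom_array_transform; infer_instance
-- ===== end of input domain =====

-- B replaces A's sort + two dicts by direct counting: rank(v) = 1 + #distinct values < v (alternative algorithm, same return value; A also mutates its argument in place, B mutates via arr[:] — equivalence proved about the return value).


-- ===== PORT A =====
-- the body of A's second loop ('if arr[i] not in hash_table: hash_table[arr[i]] = j; j += 1'), state = (hash_table, j)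
def pvTStep (st : PySem.Dict Int Int × Int) (v : Int) : PySem.Dict Int Int × Int :=
  if st.1.contains v then st else (st.1.insert v st.2, st.2 + 1)

def array_transform (arr : List Int) : List Int :=
  let n : Int := arr.length
  -- for i in range(n): if i not in hash_index: hash_index[i] = arr[i]
  let hash_index : PySem.Dict Int Int :=
    (PySem.List.pyRange 0 n 1).foldl
      (fun d i => if d.contains i then d else d.insert i (PySem.List.pyGetD arr i 0)) PySem.Dict.empty
  -- arr.sort()
  let arr1 := PySem.List.sorted arr (fun x => x) false
  -- for i in range(n): if arr[i] not in hash_table: hash_table[arr[i]] = j; j += 1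
  let st :=
    (PySem.List.pyRange 0 n 1).foldl
      (fun st i => pvTStep st (PySem.List.pyGetD arr1 i 0)) (PySem.Dict.empty, 1)
  -- for k,v in hash_index.items(): arr[k] = hash_table[v]   (lookup always hits: v is a value of arr)
  hash_index.items.foldl (fun a kv => PySem.List.pySetD a kv.1 (st.1.getD kv.2 0)) arr1

-- ===== PORT B =====
def array_transform_alt (arr : List Int) : List Int :=
  let distinct : PySem.Set Int := PySem.Set.ofList arr
  arr.map (fun v => 1 + (distinct.map (fun u => if u < v then (1 : Int) else 0)).sum)

-- ===== PRECONDITION & SPEC =====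
def Spec_array_transform (arr : List Int) (out : List Int) : Prop := out = array_transform_alt arr
instance (arr : List Int) (out : List Int) : Decidable (Spec_array_transform arr out) := by unfold Spec_array_transform; infer_instance

-- ===== CLAIM (what is proved, stated in full; the proofs are below) =====
def Claim_equal_array_transform : Prop := ∀ (arr : List Int), Dom_array_transform arr → Spec_array_transform arr (array_transform arr)

-- ===== LEMMAS AND PROOFS =====

-- A's first loop over fresh distinct keys just appends the pairs
lemma pvBuildIndex (l : List Int) (f : Int → Int) (d : PySem.Dict Int Int)
    (hnd : l.Nodup) (hf : ∀ i ∈ l, d.contains i = false) :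
    (l.foldl (fun d i => if d.contains i then d else d.insert i (f i)) d).items
      = d.items ++ l.map (fun i => (i, f i)) := by
  induction l generalizing d with
  | nil => simp
  | cons i rest ih =>
    have hci : d.contains i = false := hf i (by simp)
    have hstep : (if d.contains i then d else d.insert i (f i)) = d.insert i (f i) := by
      simp [hci]
    simp only [List.foldl_cons, hstep]
    rw [ih (d.insert i (f i)) hnd.of_cons]
    · simp [PySem.Dict.items_insert, hci]
    · intro x hx
      rw [PySem.Dict.contains_insert]
      have hxi : x ≠ i := by rintro rfl; exact (List.nodup_cons.mp hnd).1 hx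
      simp [hxi, hf x (List.mem_cons_of_mem _ hx)]

-- keys already present are untouched by the table loop
lemma pvPreserve (l : List Int) (t : PySem.Dict Int Int) (j : Int) (w : Int)
    (hw : t.contains w = true) :
    (l.foldl pvTStep (t, j)).1.contains w = true ∧
    (l.foldl pvTStep (t, j)).1.getD w 0 = t.getD w 0 := by
  induction l generalizing t j with
  | nil => simp [hw]
  | cons v rest ih =>
    simp only [List.foldl_cons]
    by_cases hc : t.contains v = true
    · simp only [pvTStep, hc, if_true]
      exact ih t j hw
    · have hne : w ≠ v := by rintro rfl; rw [hw] at hc; exact hc rfl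
      simp only [pvTStep, hc, if_false, Bool.false_eq_true]
      have h1 : (t.insert v j).contains w = true := by
        rw [PySem.Dict.contains_insert]; simp [hw]
      obtain ⟨a, b⟩ := ih (t.insert v j) (j+1) h1
      refine ⟨a, ?_⟩
      rw [b, PySem.Dict.getD_insert]
      simp [hne]

-- main invariant of A's table loop on a sorted list: the rank stored for a new value v is
-- j + #distinct not-yet-seen values < v
lemma pvTableMain (l : List Int) (t : PySem.Dict Int Int) (j : Int)
    (hs : l.Pairwise (· ≤ ·)) :
    ∀ v ∈ l, t.contains v = false →
      (l.foldl pvTStep (t, j)).1.getD v 0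
        = j + ((l.toFinset.filter (fun u => u < v ∧ t.contains u = false)).card : Int) := by
  induction l generalizing t j with
  | nil => intro v hv; simp at hv
  | cons v0 rest ih =>
    intro v hv hcv
    have hhead : ∀ u ∈ rest, v0 ≤ u := (List.pairwise_cons.mp hs).1
    simp only [List.foldl_cons]
    by_cases hc : t.contains v0 = true
    · -- skip step
      have hvne : v ≠ v0 := by rintro rfl; rw [hcv] at hc; exact absurd hc (by simp)
      have hvr : v ∈ rest := (List.mem_cons.mp hv).resolve_left hvne
      simp only [pvTStep, hc, if_true]
      rw [ih t j hs.of_cons v hvr hcv]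
      congr 2
      rw [List.toFinset_cons, Finset.filter_insert]
      simp [hc]
    · -- insert step
      have hcb : t.contains v0 = false := by simpa using hc
      simp only [pvTStep, hcb, if_false, Bool.false_eq_true]
      by_cases hvv : v = v0
      · subst hvv
        have h1 : (t.insert v j).contains v = true := PySem.Dict.contains_insert_self _ _ _
        have := (pvPreserve rest (t.insert v j) (j+1) v h1).2
        rw [this, PySem.Dict.getD_insert_self]
        have hempty : ((v :: rest).toFinset.filter (fun u => u < v ∧ t.contains u = false)) = ∅ := by
          rw [Finset.filter_eq_empty_iff]
          intro u hu
          simp only [List.toFinset_cons, Finset.mem_insert, List.mem_toFinset] at hu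
          rcases hu with rfl | hu
          · simp
          · intro hlt
            exact absurd hlt.1 (not_lt.mpr (hhead u hu))
        rw [hempty]
        simp
      · have hvr : v ∈ rest := (List.mem_cons.mp hv).resolve_left hvv
        have hlt : v0 < v := lt_of_le_of_ne (hhead v hvr) (fun h => hvv h.symm)
        have hcv' : (t.insert v0 j).contains v = false := by
          rw [PySem.Dict.contains_insert]
          simp [hvv, hcv]
        rw [ih (t.insert v0 j) (j+1) hs.of_cons v hvr hcv']
        have hcard : ((v0 :: rest).toFinset.filter (fun u => u < v ∧ t.contains u = false)).card
            = ((rest.toFinset.filter (fun u => u < v ∧ (t.insert v0 j).contains u = false)).card) + 1 := by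
          have hset : ((v0 :: rest).toFinset.filter (fun u => u < v ∧ t.contains u = false))
              = insert v0 (rest.toFinset.filter (fun u => u < v ∧ (t.insert v0 j).contains u = false)) := by
            ext u
            simp only [Finset.mem_filter, Finset.mem_insert, List.toFinset_cons, List.mem_toFinset,
              PySem.Dict.contains_insert, Bool.or_eq_false_iff, beq_eq_false_iff_ne, ne_eq]
            constructor
            · rintro ⟨hu1 | hu1, hu2, hu3⟩
              · left; exact hu1
              · by_cases huv : u = v0
                · left; exact huv
                · right; exact ⟨hu1, hu2, huv, hu3⟩
            · rintro (rfl | ⟨hu1, hu2, _, hu3⟩)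
              · exact ⟨Or.inl rfl, hlt, hcb⟩
              · exact ⟨Or.inr hu1, hu2, hu3⟩
          rw [hset, Finset.card_insert_of_notMem]
          simp only [Finset.mem_filter, not_and]
          intro _ _
          rw [PySem.Dict.contains_insert]
          simp
        rw [hcard]
        push_cast
        ring

-- writing f j at positions i, i+1, …, i+m-1 of a list of length i+m
lemma pvFoldSet {β : Type} (f : Nat → β) (m : Nat) :
    ∀ (i : Nat) (acc : List β), acc.length = i + m →
      (List.range' i m).foldl (fun a j => a.set j (f j)) acc
        = acc.take i ++ (List.range' i m).map f := by
  induction m with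
  | zero =>
    intro i acc h
    simp only [List.range', List.foldl_nil, List.map_nil, List.append_nil]
    rw [List.take_of_length_le (by omega)]
  | succ m ih =>
    intro i acc h
    rw [List.range'_succ]
    simp only [List.foldl_cons, List.map_cons]
    have hi : i < acc.length := by omega
    have hlen : (acc.set i (f i)).length = (i+1) + m := by simp; omega
    rw [ih (i+1) (acc.set i (f i)) hlen]
    have htake : (acc.set i (f i)).take (i+1) = acc.take i ++ [f i] := by
      rw [List.set_eq_take_append_cons_drop, if_pos hi]
      rw [List.take_append]
      simp [List.length_take, Nat.min_eq_left (le_of_lt hi)]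
    rw [htake]
    simp

theorem pv_main (arr : List Int) : array_transform arr = array_transform_alt arr := by
  unfold array_transform array_transform_alt
  simp only []
  set arr1 := PySem.List.sorted arr (fun x => x) false with harr1
  have hperm : arr1.Perm arr := PySem.List.sorted_perm arr (fun x => x) false
  have hlen1 : arr1.length = arr.length := hperm.length_eq
  -- the table fold over indices is a fold over arr1
  have htf : (PySem.List.pyRange 0 (arr.length : Int) 1).foldl
      (fun st i => pvTStep st (PySem.List.pyGetD arr1 i 0)) (PySem.Dict.empty, 1)
      = arr1.foldl pvTStep (PySem.Dict.empty, 1) := by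
    rw [← hlen1]
    exact PySem.List.foldl_pyRange_zero_pyGetD' arr1 0 pvTStep (PySem.Dict.empty, (1:Int))
  rw [htf]
  -- rank characterisation of the table
  have hrank : ∀ v ∈ arr, (arr1.foldl pvTStep (PySem.Dict.empty, 1)).1.getD v 0
      = 1 + ((arr.toFinset.filter (fun u => u < v)).card : Int) := by
    intro v hv
    have hv1 : v ∈ arr1 := (PySem.List.mem_sorted arr (fun x => x) false v).mpr hv
    have hsorted : arr1.Pairwise (· ≤ ·) := PySem.List.sorted_pairwise arr (fun x => x)
    have h := pvTableMain arr1 PySem.Dict.empty 1 hsorted v hv1 (PySem.Dict.contains_empty v)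
    rw [h]
    congr 2
    · rw [List.toFinset_eq_of_perm _ _ hperm]
      congr 1
      apply Finset.filter_congr
      intro u _
      simp [PySem.Dict.contains_empty]
  -- the first loop's dict is just the enumeration of arr
  have hidx : ((PySem.List.pyRange 0 (arr.length : Int) 1).foldl
      (fun d i => if d.contains i then d else d.insert i (PySem.List.pyGetD arr i 0)) PySem.Dict.empty).items
      = (PySem.List.pyRange 0 (arr.length : Int) 1).map (fun i => (i, PySem.List.pyGetD arr i 0)) := by
    rw [pvBuildIndex _ _ _ (PySem.List.nodup_pyRange_one 0 (arr.length : Int))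
      (fun i _ => PySem.Dict.contains_empty i)]
    rfl
  rw [hidx]
  rw [List.foldl_map]
  rw [PySem.List.pyRange_one]
  simp only [Int.sub_zero, Int.toNat_natCast, zero_add]
  rw [List.foldl_map]
  simp only [PySem.List.pySetD_natCast, PySem.List.pyGetD_natCast]
  rw [List.range_eq_range']
  rw [pvFoldSet (fun k => (List.foldl pvTStep (PySem.Dict.empty, 1) arr1).1.getD (arr.getD k 0) 0)
      arr.length 0 arr1 (by omega)]
  rw [← List.range_eq_range', List.take_zero, List.nil_append]
  -- map over range of positions = map over arr
  apply List.ext_getElem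
  · simp
  · intro i h1 h2
    have hi : i < arr.length := by simpa using h1
    simp only [List.getElem_map, List.getElem_range]
    rw [List.getD_eq_getElem arr 0 hi]
    have hvmem : arr[i]'hi ∈ arr := List.getElem_mem hi
    rw [hrank _ hvmem]
    -- B side value
    congr 1
    have hb : (fun u => if u < arr[i]'hi then (1:Int) else 0)
        = (fun u => if (decide (u < arr[i]'hi)) = true then (1:Int) else 0) := by
      funext u; simp
    rw [hb, PySem.List.sum_map_ite_one_zero]
    have hnd : (PySem.Set.ofList arr).Nodup := PySem.Set.nodup_ofList arr
    rw [List.countP_eq_length_filter]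
    have hfn : ((PySem.Set.ofList arr).filter (fun u => decide (u < arr[i]'hi))).Nodup :=
      hnd.filter _
    rw [← List.toFinset_card_of_nodup hfn]
    have hset : {u ∈ arr.toFinset | u < arr[i]'hi}
        = ((PySem.Set.ofList arr).filter (fun u => decide (u < arr[i]'hi))).toFinset := by
      ext u
      simp only [List.mem_toFinset, List.mem_filter, Finset.mem_filter, decide_eq_true_eq,
        PySem.Set.mem_ofList]
    rw [hset]

-- ===== VERDICT (by name: the statement is the Claim_ definition above) =====
theorem array_transform_spec : Claim_equal_array_transform := by
  intro arr _
  exact pv_main arr
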